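-- pv_equiv track=rewrite | github.com/CristyanHenrich/PerformanceReportCrescer | main.py | calcular_acertos
-- ===== SOURCE A (Python) =====
-- def calcular_acertos(aluno, gabarito, materias):
--     acertos = {}
--     total_acertos = 0
--     for materia, questoes in materias.items():
--         acertos_materia = sum([1 for q, (r, g) in enumerate(zip(aluno, gabarito), 1) if r == g and q in questoes])
--         acertos[materia] = acertos_materia
--         total_acertos += acertos_materia
--     return acertos, total_acertos
-- ===== SOURCE B (Python) =====
-- def calcular_acertos(aluno, gabarito, materias):
--     corretas = {q for q, (r, g) in enumerate(zip(aluno, gabarito), 1) if r == g}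
--     acertos = {m: len(corretas & set(qs)) for m, qs in materias.items()}
--     return acertos, sum(acertos.values())
-- ===== Notes on version B (the rewrite author's own statement) =====
-- stated objective: faster
-- what changed: B does one pass over the answers to build the set of correctly answered question numbers, then produces the result dict by a comprehension taking the size of that set's intersection with each subject's question set, and the total as sum of the dict's values, instead of A's per-subject rescan of all answers with an O(Q) list-membership test inside.
import Mathlib
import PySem

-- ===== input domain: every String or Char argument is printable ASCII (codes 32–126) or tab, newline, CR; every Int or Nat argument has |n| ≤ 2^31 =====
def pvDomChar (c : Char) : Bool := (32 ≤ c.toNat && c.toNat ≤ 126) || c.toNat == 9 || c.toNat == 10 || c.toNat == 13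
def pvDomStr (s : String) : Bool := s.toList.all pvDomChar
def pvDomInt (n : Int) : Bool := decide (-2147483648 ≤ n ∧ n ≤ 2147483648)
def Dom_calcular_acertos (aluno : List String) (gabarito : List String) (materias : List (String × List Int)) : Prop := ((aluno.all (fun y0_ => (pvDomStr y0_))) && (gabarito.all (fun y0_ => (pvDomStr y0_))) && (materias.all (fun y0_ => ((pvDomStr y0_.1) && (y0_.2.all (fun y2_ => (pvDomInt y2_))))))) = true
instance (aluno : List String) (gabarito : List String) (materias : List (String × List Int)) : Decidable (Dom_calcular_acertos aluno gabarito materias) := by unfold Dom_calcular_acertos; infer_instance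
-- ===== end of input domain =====

-- B replaces A's per-subject rescan of all answers (with a list-membership test inside) by one
-- pass building the set of correct question numbers, then a map taking each subject's question
-- set intersected with it and a sum of the resulting values; objective: faster.


-- ===== PORT A =====
-- for materia, questoes in materias.items(): count answers with r == g and q in questoes (sum of a 0/1 comprehension), insert, accumulate total
def calcular_acertos (aluno : List String) (gabarito : List String) (materias : List (String × List Int)) : (List (String × Int)) × Int :=
  let res := (PySem.Dict.ofList materias).items.foldl
    (fun (st : PySem.Dict String Int × Int) mq =>
      let acertos_materia : Int :=
        ((PySem.List.enumerate (aluno.zip gabarito) 1).map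
          (fun p => if p.2.1 == p.2.2 && decide (p.1 ∈ mq.2) then (1 : Int) else 0)).sum
      (st.1.insert mq.1 acertos_materia, st.2 + acertos_materia))
    (PySem.Dict.empty, 0)
  (res.1.items, res.2)

-- ===== PORT B =====
-- corretas = {q for q,(r,g) in enumerate(zip(aluno,gabarito),1) if r==g};
-- acertos = {m: len(corretas & set(qs)) for m, qs in materias.items()}; return acertos, sum(acertos.values())
def calcular_acertos_alt (aluno : List String) (gabarito : List String) (materias : List (String × List Int)) : (List (String × Int)) × Int :=
  let corretas : PySem.Set Int :=
    PySem.Set.ofList ((PySem.List.enumerate (aluno.zip gabarito) 1).filterMap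
      (fun p => if p.2.1 == p.2.2 then some p.1 else none))
  let acertos : List (String × Int) :=
    (PySem.Dict.ofList materias).items.map
      (fun mq => (mq.1, (PySem.Set.len (PySem.Set.inter corretas (PySem.Set.ofList mq.2)) : Int)))
  (acertos, (acertos.map (fun p => p.2)).sum)

-- ===== PRECONDITION & SPEC =====
def Spec_calcular_acertos (aluno : List String) (gabarito : List String) (materias : List (String × List Int)) (out : (List (String × Int)) × Int) : Prop := out = calcular_acertos_alt aluno gabarito materias
instance (aluno : List String) (gabarito : List String) (materias : List (String × List Int)) (out : (List (String × Int)) × Int) : Decidable (Spec_calcular_acertos aluno gabarito materias out) := by unfold Spec_calcular_acertos; infer_instance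

-- ===== CLAIM (what is proved, stated in full; the proofs are below) =====
def Claim_equal_calcular_acertos : Prop := ∀ (aluno : List String) (gabarito : List String) (materias : List (String × List Int)), Dom_calcular_acertos aluno gabarito materias → Spec_calcular_acertos aluno gabarito materias (calcular_acertos aluno gabarito materias)

-- ===== LEMMAS AND PROOFS =====

-- the list of 1-based positions of correct answers, as B's filterMap builds it
def pvCorrect (s : Int) (zs : List (String × String)) : List Int :=
  (PySem.List.enumerate zs s).filterMap (fun p => if p.2.1 == p.2.2 then some p.1 else none)

theorem pvCorrect_nil (s : Int) : pvCorrect s [] = [] := by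
  simp [pvCorrect, PySem.List.enumerate_nil]

theorem pvCorrect_cons' (s : Int) (z : String × String) (zs : List (String × String)) :
    pvCorrect s (z :: zs) =
      (if z.1 == z.2 then [s] else []) ++ pvCorrect (s + 1) zs := by
  simp only [pvCorrect, PySem.List.enumerate_cons, List.filterMap_cons]
  by_cases h : (z.1 == z.2) = true <;> simp [h]

theorem le_of_mem_pvCorrect (s q : Int) (zs : List (String × String))
    (h : q ∈ pvCorrect s zs) : s ≤ q := by
  induction zs generalizing s with
  | nil => simp [pvCorrect_nil] at h
  | cons z zs ih =>
    rw [pvCorrect_cons'] at h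
    rcases List.mem_append.1 h with h1 | h2
    · split at h1 <;> simp_all
    · have := ih (s + 1) h2; omega

theorem nodup_pvCorrect (s : Int) (zs : List (String × String)) :
    (pvCorrect s zs).Nodup := by
  induction zs generalizing s with
  | nil => simp [pvCorrect_nil]
  | cons z zs ih =>
    rw [pvCorrect_cons']
    by_cases h : (z.1 == z.2) = true
    · simp only [h, if_pos, List.singleton_append, List.nodup_cons]
      refine ⟨fun hmem => ?_, ih (s + 1)⟩
      have := le_of_mem_pvCorrect (s + 1) s zs hmem; omega
    · simp [h, ih (s + 1)]

-- A's 0/1 sum over the answer rows counts the correct positions lying in qs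
theorem count_transfer (zs : List (String × String)) (s : Int) (qs : List Int) :
    (PySem.List.enumerate zs s).countP (fun p => p.2.1 == p.2.2 && decide (p.1 ∈ qs))
      = (pvCorrect s zs).countP (fun q => decide (q ∈ qs)) := by
  induction zs generalizing s with
  | nil => simp [pvCorrect_nil, PySem.List.enumerate_nil]
  | cons z zs ih =>
    rw [pvCorrect_cons', PySem.List.enumerate_cons]
    by_cases h : (z.1 == z.2) = true <;>
      simp [List.countP_cons, h, ih (s + 1)]

-- the per-subject counts of the two ports agree
theorem per_subject_eq (aluno gabarito : List String) (qs : List Int) :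
    ((PySem.List.enumerate (aluno.zip gabarito) 1).map
        (fun p => if p.2.1 == p.2.2 && decide (p.1 ∈ qs) then (1 : Int) else 0)).sum
      = (PySem.Set.len (PySem.Set.inter
          (PySem.Set.ofList ((PySem.List.enumerate (aluno.zip gabarito) 1).filterMap
            (fun p => if p.2.1 == p.2.2 then some p.1 else none)))
          (PySem.Set.ofList qs)) : Int) := by
  rw [PySem.List.sum_map_ite_one_zero, count_transfer (aluno.zip gabarito) 1 qs]
  have hC : PySem.Set.ofList (pvCorrect 1 (aluno.zip gabarito)) = pvCorrect 1 (aluno.zip gabarito) :=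
    PySem.Set.ofList_eq_self_of_nodup _ (nodup_pvCorrect 1 _)
  show _ = (PySem.Set.len (PySem.Set.inter (PySem.Set.ofList (pvCorrect 1 (aluno.zip gabarito))) (PySem.Set.ofList qs)) : Int)
  rw [hC]
  rw [List.countP_eq_length_filter]
  simp [PySem.Set.inter, PySem.Set.mem_ofList]

-- A's fold over pairs with distinct keys: items become the appended map, the total is the sum
theorem fold_items_sum (f : String × List Int → Int)
    (l : List (String × List Int)) (d : PySem.Dict String Int) (t : Int)
    (hnd : (d.keys ++ l.map Prod.fst).Nodup) :
    (l.foldl (fun (st : PySem.Dict String Int × Int) mq =>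
        (st.1.insert mq.1 (f mq), st.2 + f mq)) (d, t))
      = (PySem.Dict.mk (d.items ++ l.map (fun mq => (mq.1, f mq))), t + (l.map f).sum) := by
  induction l generalizing d t with
  | nil =>
    simp
  | cons mq l ih =>
    simp only [List.foldl_cons, List.map_cons, List.sum_cons]
    have hkeys : (d.keys ++ (mq :: l).map Prod.fst).Nodup := hnd
    have hnotin : mq.1 ∉ d.keys := by
      intro hmem
      have := (List.nodup_append.1 hkeys).2.2
      exact this mq.1 hmem mq.1 (by simp) rfl
    have hnc : d.contains mq.1 = false := by
      rw [PySem.Dict.contains_eq_decide_mem_keys]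
      simp [hnotin]
    have hitems := PySem.Dict.items_insert_of_not_contains d (f mq) hnc
    have hk2 : ((d.insert mq.1 (f mq)).keys ++ l.map Prod.fst).Nodup := by
      have : (d.insert mq.1 (f mq)).keys = d.keys ++ [mq.1] := by
        simp only [PySem.Dict.keys, hitems, List.map_append, List.map_cons, List.map_nil]
      rw [this]
      have := hnd
      simp only [List.map_cons] at this
      rw [List.append_assoc, List.singleton_append]
      exact this
    rw [ih _ _ hk2, hitems]
    simp [List.append_assoc]
    ring

-- ===== VERDICT (by name: the statement is the Claim_ definition above) =====
theorem calcular_acertos_spec : Claim_equal_calcular_acertos := by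
  intro aluno gabarito materias _
  show calcular_acertos aluno gabarito materias = calcular_acertos_alt aluno gabarito materias
  unfold calcular_acertos calcular_acertos_alt
  have hnd : ((PySem.Dict.empty : PySem.Dict String Int).keys
      ++ ((PySem.Dict.ofList materias).items.map Prod.fst)).Nodup := by
    simpa [PySem.Dict.keys] using PySem.Dict.nodup_keys_ofList (ps := materias) (ν := List Int)
  rw [fold_items_sum
      (fun mq => ((PySem.List.enumerate (aluno.zip gabarito) 1).map
        (fun p => if p.2.1 == p.2.2 && decide (p.1 ∈ mq.2) then (1 : Int) else 0)).sum)
      _ _ _ hnd]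
  simp only [per_subject_eq aluno gabarito]
  simp [Function.comp_def, PySem.Dict.empty]
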